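-- pv_equiv track=rewrite | github.com/neosizzle/gomoku | backend/example/static_eval_example/main.py | generate_row_indices
-- ===== SOURCE A (Python) =====
-- def generate_row_indices(board_size):
--     row_indices = []
--     for i in range(board_size):
--         curr_row = []
--         for j in range(board_size):
--             curr_row.append(i * board_size + j)
--         row_indices.append(curr_row)
--     return row_indices
-- ===== SOURCE B (Python) =====
-- def generate_row_indices(board_size):
--     n = max(board_size, 0)
--     flat = range(n * n)
--     return [list(flat[i * n:(i + 1) * n]) for i in range(n)]
-- ===== Notes on version B (the rewrite author's own statement) =====
-- stated objective: alternative
-- what changed: B builds the flat sequence 0..n*n-1 once and reshapes it into rows by slicing, instead of nested loops recomputing i*board_size+j per element.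
import Mathlib
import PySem

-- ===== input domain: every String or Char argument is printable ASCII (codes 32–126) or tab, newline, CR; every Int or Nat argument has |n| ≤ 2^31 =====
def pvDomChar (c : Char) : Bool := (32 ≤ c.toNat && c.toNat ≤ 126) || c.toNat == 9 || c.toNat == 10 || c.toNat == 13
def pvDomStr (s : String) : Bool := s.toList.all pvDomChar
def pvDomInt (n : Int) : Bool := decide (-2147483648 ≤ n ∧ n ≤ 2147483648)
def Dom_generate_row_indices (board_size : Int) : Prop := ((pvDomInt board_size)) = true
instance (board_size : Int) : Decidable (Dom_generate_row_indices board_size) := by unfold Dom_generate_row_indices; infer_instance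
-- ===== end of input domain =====

-- B builds the flat index sequence 0..n*n-1 once and reshapes it into rows by slicing (alternative decomposition; same cost).


-- ===== PORT A =====
def generate_row_indices (board_size : Int) : List (List Int) :=
  (PySem.List.pyRange 0 board_size 1).foldl
    (fun row_indices i =>
      row_indices ++
        [(PySem.List.pyRange 0 board_size 1).foldl
          (fun curr_row j => curr_row ++ [i * board_size + j]) []])
    []

-- ===== PORT B =====
-- B: build flat = list(range(n*n)) once, then chunk it into rows by slicing.
def generate_row_indices_alt (board_size : Int) : List (List Int) :=
  let n := max board_size 0
  let flat := PySem.List.pyRange 0 (n * n) 1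
  (PySem.List.pyRange 0 n 1).map
    (fun i => PySem.List.slice flat (some (i * n)) (some ((i + 1) * n)))

-- ===== PRECONDITION & SPEC =====
def Spec_generate_row_indices (board_size : Int) (out : List (List Int)) : Prop := out = generate_row_indices_alt board_size
instance (board_size : Int) (out : List (List Int)) : Decidable (Spec_generate_row_indices board_size out) := by unfold Spec_generate_row_indices; infer_instance

-- ===== CLAIM (what is proved, stated in full; the proofs are below) =====
def Claim_equal_generate_row_indices : Prop := ∀ (board_size : Int), Dom_generate_row_indices board_size → Spec_generate_row_indices board_size (generate_row_indices board_size)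

-- ===== LEMMAS AND PROOFS =====

-- ===== VERDICT (by name: the statement is the Claim_ definition above) =====
-- One row of B: a slice of range(n*n) is the corresponding contiguous pyRange.
theorem pv_row_eq (n i : Int) (h0 : 0 ≤ i) (hi : i < n) :
    PySem.List.slice (PySem.List.pyRange 0 (n * n) 1) (some (i * n)) (some ((i + 1) * n))
      = (PySem.List.pyRange 0 n 1).map (fun j => i * n + j) := by
  have hn : 0 < n := lt_of_le_of_lt h0 hi
  have ha : 0 ≤ i * n := mul_nonneg h0 (le_of_lt hn)
  have hb : 0 ≤ (i + 1) * n := mul_nonneg (by omega) (le_of_lt hn)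
  have c1 : ((i * n).toNat : Int) = i * n := Int.toNat_of_nonneg ha
  have c2 : (((i + 1) * n).toNat : Int) = (i + 1) * n := Int.toNat_of_nonneg hb
  have c3 : ((n * n).toNat : Int) = n * n := Int.toNat_of_nonneg (by positivity)
  have c4 : (i + 1) * n ≤ n * n := by nlinarith
  have c5 : i * n + n = (i + 1) * n := by ring
  rw [PySem.List.slice_toNat _ ha hb]
  apply List.ext_getElem
  · simp only [List.length_take, List.length_drop, List.length_map,
      PySem.List.length_pyRange_one]
    omega
  · intro k h1 h2
    have hk : k < n.toNat := by
      simpa [PySem.List.length_pyRange_one] using h2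
    simp only [List.getElem_take, List.getElem_drop, List.getElem_map]
    rw [PySem.List.getElem_pyRange_one, PySem.List.getElem_pyRange_one]
    push_cast
    omega

theorem generate_row_indices_spec : Claim_equal_generate_row_indices := by
  intro n _
  unfold Spec_generate_row_indices generate_row_indices generate_row_indices_alt
  rw [PySem.List.foldl_append_singleton_eq_map]
  simp only [List.nil_append]
  rcases (by omega : n ≤ 0 ∨ 0 < n) with hn | hn
  · rw [PySem.List.pyRange_one_eq_nil hn, PySem.List.pyRange_one_eq_nil (by omega : max n 0 ≤ 0)]
    simp
  · rw [max_eq_left (le_of_lt hn)]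
    apply List.map_congr_left
    intro i hi
    rw [PySem.List.foldl_append_singleton_eq_map, List.nil_append]
    rw [PySem.List.mem_pyRange_one] at hi
    exact (pv_row_eq n i hi.1 hi.2).symm
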